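-- pv_equiv track=rewrite | github.com/bysse/advent-of-code | 2023/python/day09.py | calculate
-- ===== SOURCE A (Python) =====
-- def calculate(xs):
--     first = []
--     last = []
--     while xs:
--         first.append(xs[0])
--         last.append(xs[-1])
--         row = []
--         for i in range(1, len(xs)):
--             row.append(xs[i] - xs[i - 1])
--         if row.count(0) == len(row):
--             break
--         xs = row
--     return first, last
-- ===== SOURCE B (Python) =====
-- def calculate(xs):
--     if not xs:
--         return [], []
--     n = len(xs)
--     fwd = list(xs)      # after pass k, fwd[:k] holds the firsts, fwd[k:] the k-th difference row
--     last = [xs[-1]]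
--     depth = 1
--     for k in range(1, n):
--         for i in range(n - 1, k - 1, -1):
--             fwd[i] -= fwd[i - 1]
--         if all(v == 0 for v in fwd[k:]):
--             break
--         last.append(fwd[-1])
--         depth += 1
--     return fwd[:depth], last
-- ===== Notes on version B (the rewrite author's own statement) =====
-- stated objective: alternative
-- what changed: B computes the difference triangle in place in a single array with a reverse-order inner pass, so the firsts accumulate as the growing array prefix and no per-level row list is ever allocated, instead of A's loop that materialises each difference row as a new list and appends to two accumulator lists.
import Mathlib
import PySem

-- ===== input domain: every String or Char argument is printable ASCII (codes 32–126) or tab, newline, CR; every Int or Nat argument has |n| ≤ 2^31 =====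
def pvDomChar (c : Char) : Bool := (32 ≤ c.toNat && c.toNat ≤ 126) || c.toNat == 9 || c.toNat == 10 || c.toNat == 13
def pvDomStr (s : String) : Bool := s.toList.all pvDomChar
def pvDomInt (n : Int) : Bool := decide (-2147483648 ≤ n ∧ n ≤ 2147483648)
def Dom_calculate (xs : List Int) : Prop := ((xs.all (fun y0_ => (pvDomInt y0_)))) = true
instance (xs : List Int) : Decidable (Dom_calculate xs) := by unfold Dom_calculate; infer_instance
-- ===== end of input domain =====

-- B builds the difference triangle in place in one array (reverse inner pass; the firsts
-- accumulate as the array prefix), instead of A's loop that materialises each difference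
-- row as a new list and appends to two accumulator lists (objective: alternative).

-- ===== PORT A =====
-- row = []; for i in range(1, len(xs)): row.append(xs[i] - xs[i-1])
-- (pyGetD is exact here: every index i and i-1 produced by the range is in bounds)
def calcRowA (xs : List Int) : List Int :=
  (PySem.List.pyRange 1 (xs.length : Int) 1).foldl
    (fun row i => row ++ [PySem.List.pyGetD xs i 0 - PySem.List.pyGetD xs (i - 1) 0]) []

-- used by calcLoop's decreasing_by (cited there by name)
theorem calcRowA_length (xs : List Int) : (calcRowA xs).length = xs.length - 1 := by
  rw [calcRowA, PySem.List.foldl_append_singleton_eq_map]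
  simp [PySem.List.length_pyRange_one]

-- the while-loop of A, with its two accumulator lists
def calcLoop : List Int → List Int → List Int → List Int × List Int
  | [], first, last => (first, last)
  | x :: rest, first, last =>
    -- first.append(xs[0]); last.append(xs[-1])   (xs[-1] exact: list nonempty)
    let first' := first ++ [x]
    let last' := last ++ [PySem.List.pyGetD (x :: rest) (-1) 0]
    let row := calcRowA (x :: rest)
    if row.count 0 = row.length then (first', last')
    else calcLoop row first' last'
termination_by xs => xs.length
decreasing_by simp [calcRowA_length]

def calculate (xs : List Int) : List Int × List Int := calcLoop xs [] []

-- ===== PORT B =====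
-- for i in range(n - 1, k - 1, -1): fwd[i] -= fwd[i - 1]
-- (pySetD/pyGetD are exact here: every index the countdown range yields is in bounds)
def altPass (n k : Nat) (fwd : List Int) : List Int :=
  (PySem.List.pyRange ((n : Int) - 1) ((k : Int) - 1) (-1)).foldl
    (fun f i => PySem.List.pySetD f i (PySem.List.pyGetD f i 0 - PySem.List.pyGetD f (i - 1) 0)) fwd

-- the 'for k in range(1, n)' loop of Source B, with its break, as recursion on k
def altLoop (n k : Nat) (fwd last : List Int) (depth : Nat) : List Int × List Int × Nat :=
  if k < n then
    let fwd' := altPass n k fwd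
    if (PySem.List.slice fwd' (some (k : Int)) none).all (· == 0) then (fwd', last, depth)
    else altLoop n (k + 1) fwd' (last ++ [PySem.List.pyGetD fwd' (-1) 0]) (depth + 1)
  else (fwd, last, depth)
termination_by n - k

def calculate_alt (xs : List Int) : List Int × List Int :=
  if xs = [] then ([], [])
  else
    let n := xs.length
    let t := altLoop n 1 xs [PySem.List.pyGetD xs (-1) 0] 1
    (PySem.List.slice t.1 none (some ((t.2.2 : Nat) : Int)), t.2.1)

-- ===== PRECONDITION & SPEC =====
def Spec_calculate (xs : List Int) (out : List Int × List Int) : Prop := out = calculate_alt xs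
instance (xs : List Int) (out : List Int × List Int) : Decidable (Spec_calculate xs out) := by unfold Spec_calculate; infer_instance

-- ===== CLAIM (what is proved, stated in full; the proofs are below) =====
def Claim_equal_calculate : Prop := ∀ (xs : List Int), Dom_calculate xs → Spec_calculate xs (calculate xs)

-- ===== LEMMAS AND PROOFS =====

-- A's index-loop row equals the zip-style difference row
theorem calcRowA_eq (xs : List Int) :
    calcRowA xs = List.zipWith (fun a b => b - a) xs (xs.drop 1) := by
  rw [calcRowA, PySem.List.foldl_append_singleton_eq_map, PySem.List.pyRange_one]
  apply List.ext_getElem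
  · simp [List.length_zipWith]
  · intro k h1 h2
    have hk : k < xs.length - 1 := by
      simp [List.length_zipWith] at h2; omega
    simp only [List.nil_append, List.map_map, List.getElem_map, List.getElem_range,
      Function.comp]
    rw [show (1 + (k : Int)) = ((k + 1 : Nat) : Int) by push_cast; ring]
    rw [show ((k + 1 : Nat) : Int) - 1 = ((k : Nat) : Int) by push_cast; ring]
    rw [PySem.List.pyGetD_natCast, PySem.List.pyGetD_natCast]
    have hk1 : k + 1 < xs.length := by omega
    have hk0 : k < xs.length := by omega
    simp [List.getElem_zipWith, List.getD_eq_getElem?_getD, hk1, hk0]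

-- countdown range peels its LAST element
theorem pyRange_neg_one_snoc (a b : Int) (h : b + 1 ≤ a) :
    PySem.List.pyRange a b (-1) = PySem.List.pyRange a (b+1) (-1) ++ [b+1] := by
  rw [PySem.List.pyRange_neg_one_eq_reverse, PySem.List.pyRange_one_cons (by omega),
    PySem.List.pyRange_neg_one_eq_reverse]
  simp

theorem altPass_closed (r : List Int) : ∀ (F : List Int), r ≠ [] →
    altPass (F.length + r.length) (F.length + 1) (F ++ r)
      = F ++ r.headI :: List.zipWith (fun a b => b - a) r r.tail := by
  induction r with
  | nil => intro F h; exact absurd rfl h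
  | cons a r'' ih =>
    intro F _
    match r'' with
    | [] =>
      rw [altPass, PySem.List.pyRange_neg_one_eq_nil (by simp)]
      simp
    | h :: t =>
      rw [altPass]
      rw [show ((((F.length + 1 : Nat)) : Int) - 1) = ((F.length : Int) - 1) + 1 by push_cast; ring]
      rw [pyRange_neg_one_snoc _ _ (by simp)]
      rw [List.foldl_append]
      have hinner := ih (F ++ [a]) (by simp)
      rw [altPass] at hinner
      have e1 : (((F ++ [a]).length + (h :: t).length : Nat) : Int) - 1
          = ((F.length + (a :: h :: t).length : Nat) : Int) - 1 := by simp; omega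
      have e2 : (((F ++ [a]).length + 1 : Nat) : Int) - 1 = ((F.length : Int) - 1) + 1 + 1 := by simp
      rw [e1, e2, List.append_assoc] at hinner
      simp only [List.cons_append, List.nil_append] at hinner
      rw [hinner]
      simp only [List.foldl_cons, List.foldl_nil]
      have hL : ((F.length : Int) - 1 + 1 + 1) = (((F ++ [a]).length : Nat) : Int) := by simp
      have hget1 : PySem.List.pyGetD ((F ++ [a]) ++ (h :: t).headI ::
            List.zipWith (fun a b => b - a) (h :: t) (h :: t).tail)
          ((F.length : Int) - 1 + 1 + 1) 0 = h := by
        rw [hL, PySem.List.pyGetD_natCast]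
        simp
      have hget0 : PySem.List.pyGetD ((F ++ [a]) ++ (h :: t).headI ::
            List.zipWith (fun a b => b - a) (h :: t) (h :: t).tail)
          (((F.length : Int) - 1 + 1 + 1) - 1) 0 = a := by
        rw [show (((F.length : Int) - 1 + 1 + 1) - 1) = ((F.length : Nat) : Int) by ring]
        rw [PySem.List.pyGetD_natCast]
        simp
      rw [hget1, hget0, hL, PySem.List.pySetD_natCast]
      simp

-- pyGetD at -1 sees only the (nonempty) right part of an append
theorem pyGetD_neg_one_append (p q : List Int) (hq : q ≠ []) :
    PySem.List.pyGetD (p ++ q) (-1) 0 = PySem.List.pyGetD q (-1) 0 := by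
  have h1 : 1 ≤ q.length := List.length_pos_iff.mpr hq
  simp [PySem.List.pyGetD, PySem.List.pyGet?, PySem.List.pyIdx?]
  rw [if_pos (show (1:Int) ≤ ↑p.length + ↑q.length by omega), if_pos h1]
  simp only [Option.bind_some]
  rw [List.getElem?_append_right (by omega)]
  have : p.length + q.length - 1 - p.length = q.length - 1 := by omega
  rw [this]

-- A's loop with accumulators F/lastA computes what B's in-place loop leaves in the array
theorem loop_eq (r F lastA : List Int) (hr : r ≠ []) :
    (PySem.List.slice (altLoop (F.length + r.length) (F.length + 1) (F ++ r)
        (lastA ++ [PySem.List.pyGetD r (-1) 0]) (F.length + 1)).1 none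
        (some (((altLoop (F.length + r.length) (F.length + 1) (F ++ r)
        (lastA ++ [PySem.List.pyGetD r (-1) 0]) (F.length + 1)).2.2 : Nat) : Int)),
     (altLoop (F.length + r.length) (F.length + 1) (F ++ r)
        (lastA ++ [PySem.List.pyGetD r (-1) 0]) (F.length + 1)).2.1)
      = calcLoop r F lastA := by
  revert hr
  induction r, F, lastA using calcLoop.induct with
  | case1 F lastA => intro h; exact absurd rfl h
  | case2 x rest F lastA _row hc =>
    intro _
    cases rest with
    | nil =>
      rw [altLoop, if_neg (by simp)]
      rw [calcLoop, if_pos (by simp [calcRowA_eq])]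
      rw [PySem.List.slice_to_natCast]
      simp
    | cons h tl =>
      have hc' : (List.zipWith (fun a b => b - a) (x :: h :: tl) (h :: tl)).count 0
          = (List.zipWith (fun a b => b - a) (x :: h :: tl) (h :: tl)).length := by
        have h0 : (calcRowA (x :: h :: tl)).count 0 = (calcRowA (x :: h :: tl)).length := hc
        rw [calcRowA_eq] at h0
        simpa using h0
      have hall : ((List.zipWith (fun a b => b - a) (x :: h :: tl) (h :: tl)).all
          (· == 0)) = true := by
        rw [List.all_eq_true]
        intro b hb
        simpa using (List.count_eq_length.mp hc' b hb).symm
      have hcl := altPass_closed (x :: h :: tl) F (by simp)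
      simp only [List.headI, List.tail_cons] at hcl
      rw [altLoop, if_pos (by simp), hcl]
      rw [show F ++ x :: List.zipWith (fun a b => b - a) (x :: h :: tl) (h :: tl)
            = (F ++ [x]) ++ List.zipWith (fun a b => b - a) (x :: h :: tl) (h :: tl) by simp]
      rw [show ((F.length + 1 : Nat) : Int) = (((F ++ [x]).length : Nat) : Int) by simp]
      simp only [PySem.List.slice_from_natCast, List.drop_left, hall, if_true]
      rw [calcLoop, if_pos hc, PySem.List.slice_to_natCast]
      rw [show F.length + 1 = (F ++ [x]).length by simp, List.take_left]
  | case3 x rest F lastA _f _l _row hc ih =>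
    intro _
    cases rest with
    | nil =>
      exact absurd (show (calcRowA [x]).count 0 = (calcRowA [x]).length by
        simp [calcRowA_eq]) hc
    | cons h tl =>
      have hc' : ¬ ((List.zipWith (fun a b => b - a) (x :: h :: tl) (h :: tl)).count 0
          = (List.zipWith (fun a b => b - a) (x :: h :: tl) (h :: tl)).length) := by
        intro h0
        apply hc
        show (calcRowA (x :: h :: tl)).count 0 = (calcRowA (x :: h :: tl)).length
        rw [calcRowA_eq]
        simpa using h0
      have hnall : ¬ (((List.zipWith (fun a b => b - a) (x :: h :: tl) (h :: tl)).all
          (· == 0)) = true) := by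
        intro hh
        rw [List.all_eq_true] at hh
        exact hc' (List.count_eq_length.mpr
          (fun b hb => (show b = (0:Int) by simpa using hh b hb).symm))
      have hcl := altPass_closed (x :: h :: tl) F (by simp)
      simp only [List.headI, List.tail_cons] at hcl
      have hzw := calcRowA_eq (x :: h :: tl)
      simp only [List.drop_one, List.tail_cons] at hzw
      rw [altLoop, if_pos (by simp), hcl]
      rw [show F ++ x :: List.zipWith (fun a b => b - a) (x :: h :: tl) (h :: tl)
            = (F ++ [x]) ++ List.zipWith (fun a b => b - a) (x :: h :: tl) (h :: tl) by simp]
      rw [show ((F.length + 1 : Nat) : Int) = (((F ++ [x]).length : Nat) : Int) by simp]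
      simp only [PySem.List.slice_from_natCast, List.drop_left, hnall]
      rw [pyGetD_neg_one_append (F ++ [x]) _ (by simp)]
      rw [calcLoop, if_neg hc]
      rw [← hzw]
      rw [show F.length + (x :: h :: tl).length
            = (F ++ [x]).length + (calcRowA (x :: h :: tl)).length by simp [calcRowA_length]; omega]
      rw [show F.length + 1 + 1 = (F ++ [x]).length + 1 by simp]
      exact ih (show calcRowA (x :: h :: tl) ≠ [] by rw [hzw]; simp)

theorem calculate_spec : Claim_equal_calculate := by
  intro xs _
  unfold Spec_calculate calculate calculate_alt
  match xs with
  | [] => simp [calcLoop]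
  | x :: rest =>
    have h := loop_eq (x :: rest) [] [] (by simp)
    simp only [List.length_nil, List.nil_append, Nat.zero_add] at h
    simp only [if_neg (List.cons_ne_nil x rest)]
    exact h.symm
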